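-- pv_equiv track=rewrite | github.com/R1NLER/hyperdrive | app.py | _root_physical_disk
-- ===== SOURCE A (Python) =====
-- from typing import Any
--
-- def _root_physical_disk(parts: list[dict[str, Any]]) -> str | None:
--     """Devuelve el nombre del disco físico que contiene '/'.
--
--     Soporta casos donde '/' está sobre LVM/crypt: resolvemos la cadena PKNAME
--     hasta llegar al disco superior (p.ej. ubuntu-lv -> sda3 -> sda).
--     """
--
--     root_name: str | None = None
--     for p in parts:
--         if (p.get("mountpoint") or "") == "/":
--             root_name = p.get("name") or None
--             break
--     if not root_name:
--         return None
--
--     name_to_parent: dict[str, str] = {}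
--     for p in parts:
--         n = (p.get("name") or "").strip()
--         parent = (p.get("pkname") or "").strip()
--         if n and parent:
--             name_to_parent[n] = parent
--
--     cur = root_name
--     seen: set[str] = set()
--     while True:
--         parent = name_to_parent.get(cur)
--         if not parent:
--             return cur
--         if parent in seen:
--             return parent
--         seen.add(parent)
--         cur = parent
-- ===== SOURCE B (Python) =====
-- from typing import Any
--
-- def _root_physical_disk(parts: list[dict[str, Any]]) -> str | None:
--     root_name = next((p.get("name") or None for p in parts
--                       if (p.get("mountpoint") or "") == "/"), None)
--     if not root_name:
--         return None
--     parent_of = {(p.get("name") or "").strip(): (p.get("pkname") or "").strip()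
--                  for p in parts
--                  if (p.get("name") or "").strip() and (p.get("pkname") or "").strip()}
--     # Stage 1: materialize the bounded ancestor chain (len(parts)+1 steps always
--     # suffice: by pigeonhole a longer chain must already repeat a parent).
--     chain = [root_name]
--     for _ in range(len(parts) + 1):
--         parent = parent_of.get(chain[-1])
--         if not parent:
--             break
--         chain.append(parent)
--     # Stage 2: analyze the chain: the answer is the first parent that repeats an
--     # earlier parent (a cycle), otherwise the end of the chain.
--     for j in range(1, len(chain)):
--         if chain[j] in chain[1:j]:
--             return chain[j]
--     return chain[-1]
-- ===== Notes on version B (the rewrite author's own statement) =====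
-- stated objective: alternative
-- what changed: B decouples traversal from cycle detection: instead of A's while-loop that maintains a seen-set and early-returns, B first materializes the bounded ancestor chain as a list (len(parts)+1 steps suffice by pigeonhole) and then a separate pass scans that list for the first parent repeating an earlier one, falling back to the chain's last element; the parent map becomes a dict comprehension and phase 1 a next() over a generator.
import Mathlib
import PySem

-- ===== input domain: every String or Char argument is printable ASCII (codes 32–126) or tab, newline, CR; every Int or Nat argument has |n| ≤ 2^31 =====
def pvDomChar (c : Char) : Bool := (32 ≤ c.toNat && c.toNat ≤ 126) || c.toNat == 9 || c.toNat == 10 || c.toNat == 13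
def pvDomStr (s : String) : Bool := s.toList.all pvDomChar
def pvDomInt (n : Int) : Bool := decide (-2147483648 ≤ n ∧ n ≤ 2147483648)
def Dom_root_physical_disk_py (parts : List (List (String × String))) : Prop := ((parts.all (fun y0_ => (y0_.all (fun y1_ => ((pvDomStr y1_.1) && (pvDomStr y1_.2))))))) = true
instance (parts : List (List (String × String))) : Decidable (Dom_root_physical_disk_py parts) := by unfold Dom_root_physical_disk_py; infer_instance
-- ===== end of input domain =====

-- B decouples traversal from cycle detection: it materializes the bounded ancestor
-- chain as a list in one stage, then a second stage scans that list for the first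
-- repeated parent (no seen-set maintained during the walk). Objective: alternative.

-- shared input accessor: Python's p.get(k) on a dict rendered as an association list (first match)
def pvGet (p : List (String × String)) (k : String) : Option String :=
  (p.find? (fun kv => kv.1 == k)).map (·.2)

-- ===== PORT A =====
-- phase 1: 'for p in parts: if (p.get("mountpoint") or "") == "/": root_name = p.get("name") or None; break'
def pvFindRootA : List (List (String × String)) → Option String
  | [] => none
  | p :: rest =>
    if ((pvGet p "mountpoint").getD "") == "/" then
      (if ((pvGet p "name").getD "") = "" then none else some ((pvGet p "name").getD ""))
    else pvFindRootA rest

-- phase 2: the name_to_parent dict (later entries overwrite earlier ones)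
def pvDictA (parts : List (List (String × String))) : PySem.Dict String String :=
  parts.foldl (fun d p =>
    if PySem.Str.strip ((pvGet p "name").getD "") ≠ "" ∧
       PySem.Str.strip ((pvGet p "pkname").getD "") ≠ "" then
      d.insert (PySem.Str.strip ((pvGet p "name").getD ""))
               (PySem.Str.strip ((pvGet p "pkname").getD ""))
    else d) PySem.Dict.empty

-- the 'while True' chain walk; fuel parts.length + 2 always suffices (each pass adds a
-- fresh parent to `seen`, and there are at most parts.length distinct parents)
def pvWalkA (d : PySem.Dict String String) : Nat → String → PySem.Set String → Option String
  | 0, cur, _ => some cur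
  | fuel + 1, cur, seen =>
    match d.get? cur with
    | none => some cur
    | some parent =>
      if parent = "" then some cur          -- 'if not parent' on a string value
      else if PySem.Set.contains seen parent then some parent
      else pvWalkA d fuel parent (PySem.Set.add seen parent)

def root_physical_disk_py (parts : List (List (String × String))) : Option String :=
  match pvFindRootA parts with
  | none => none
  | some rn =>
    if rn = "" then none                    -- 'if not root_name: return None'
    else pvWalkA (pvDictA parts) (parts.length + 2) rn PySem.Set.empty

-- ===== PORT B =====
-- Source B's dict comprehension: filter the parts, then insert each stripped pair
def pvDictB (parts : List (List (String × String))) : PySem.Dict String String :=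
  (parts.filter (fun p =>
      !(PySem.Str.strip ((pvGet p "name").getD "") == "") &&
      !(PySem.Str.strip ((pvGet p "pkname").getD "") == ""))).foldl
    (fun d p =>
      d.insert (PySem.Str.strip ((pvGet p "name").getD ""))
               (PySem.Str.strip ((pvGet p "pkname").getD ""))) PySem.Dict.empty

-- stage 1: the bounded chain of parents appended after root ('for _ in range(len(parts)+1)')
def pvGen (d : PySem.Dict String String) : Nat → String → List String
  | 0, _ => []
  | k + 1, cur =>
    match d.get? cur with
    | none => []
    | some parent => if parent = "" then [] else parent :: pvGen d k parent

-- stage 2: first element of the list repeating an earlier one ('if chain[j] in chain[1:j]')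
def pvFirstDup : List String → List String → Option String
  | _, [] => none
  | pre, x :: xs => if x ∈ pre then some x else pvFirstDup (pre ++ [x]) xs

def root_physical_disk_py_alt (parts : List (List (String × String))) : Option String :=
  match ((parts.find? (fun p => (pvGet p "mountpoint").getD "" == "/")).bind
           (fun p => pvGet p "name")).filter (fun n => !(n == "")) with
  | none => none
  | some rn =>
    match pvFirstDup [] (pvGen (pvDictB parts) (parts.length + 1) rn) with
    | some v => some v
    | none => some ((pvGen (pvDictB parts) (parts.length + 1) rn).getLastD rn)

-- ===== PRECONDITION & SPEC =====
def Spec_root_physical_disk_py (parts : List (List (String × String))) (out : Option String) : Prop := out = root_physical_disk_py_alt parts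
instance (parts : List (List (String × String))) (out : Option String) : Decidable (Spec_root_physical_disk_py parts out) := by unfold Spec_root_physical_disk_py; infer_instance

-- ===== CLAIM (what is proved, stated in full; the proofs are below) =====
def Claim_equal_root_physical_disk_py : Prop := ∀ (parts : List (List (String × String))), Dom_root_physical_disk_py parts → Spec_root_physical_disk_py parts (root_physical_disk_py parts)

-- ===== LEMMAS AND PROOFS =====

-- a value surviving the non-emptiness filter is non-empty
theorem pvFilter_ne (o : Option String) (a : String)
    (h : o.filter (fun n => !(n == "")) = some a) : a ≠ "" := by
  cases o with
  | none => simp [Option.filter] at h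
  | some x =>
    simp only [Option.filter] at h
    by_cases hx : (!(x == "")) = true
    · simp only [hx, if_true] at h; cases h; simpa using hx
    · simp [hx] at h

-- A's phase 1 equals B's phase 1
theorem pvRoot_eq (parts : List (List (String × String))) :
    pvFindRootA parts
      = ((parts.find? (fun p => (pvGet p "mountpoint").getD "" == "/")).bind
           (fun p => pvGet p "name")).filter (fun n => !(n == "")) := by
  induction parts with
  | nil => rfl
  | cons p rest ih =>
    rw [pvFindRootA, List.find?]
    by_cases h : ((pvGet p "mountpoint").getD "" == "/") = true
    · rw [h, if_pos rfl]
      cases hn : pvGet p "name" with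
      | none => simp [hn]
      | some n =>
        by_cases hne : n = "" <;> simp [hn, hne, Option.filter]
    · rw [if_neg (by simpa using h), Bool.not_eq_true] at *
      rw [h, ih]

-- B's filtered dict comprehension builds A's dict
theorem pvDictB_eq (parts : List (List (String × String))) : pvDictB parts = pvDictA parts := by
  rw [pvDictB, pvDictA, List.foldl_filter]
  congr 1
  funext d p
  by_cases h : PySem.Str.strip ((pvGet p "name").getD "") = "" <;>
    by_cases h' : PySem.Str.strip ((pvGet p "pkname").getD "") = "" <;>
    simp [h, h']

-- each foldl step inserts at most one entry
theorem pvDictA_size_le_aux (l : List (List (String × String))) :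
    ∀ (d : PySem.Dict String String),
      (l.foldl (fun d p =>
        if PySem.Str.strip ((pvGet p "name").getD "") ≠ "" ∧
           PySem.Str.strip ((pvGet p "pkname").getD "") ≠ "" then
          d.insert (PySem.Str.strip ((pvGet p "name").getD ""))
                   (PySem.Str.strip ((pvGet p "pkname").getD ""))
        else d) d).size ≤ d.size + l.length := by
  induction l with
  | nil => intro d; simp
  | cons p rest ih =>
    intro d
    rw [List.foldl_cons, List.length_cons]
    refine le_trans (ih _) ?_
    have : (if PySem.Str.strip ((pvGet p "name").getD "") ≠ "" ∧
               PySem.Str.strip ((pvGet p "pkname").getD "") ≠ "" then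
              d.insert (PySem.Str.strip ((pvGet p "name").getD ""))
                       (PySem.Str.strip ((pvGet p "pkname").getD ""))
            else d).size ≤ d.size + 1 := by
      split
      · rw [PySem.Dict.size_insert]; split <;> omega
      · omega
    omega

theorem pvDictA_size_le (parts : List (List (String × String))) :
    (pvDictA parts).size ≤ parts.length := by
  have := pvDictA_size_le_aux parts PySem.Dict.empty
  simpa [pvDictA] using this

-- removing one present element from the filter domain strictly shrinks the filtered list
theorem pvFilter_measure (l pre : List String) (p : String) (hp : p ∈ l) (hnp : p ∉ pre) :
    (l.filter (fun x => decide (x ∉ pre ++ [p]))).length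
      < (l.filter (fun x => decide (x ∉ pre))).length := by
  have he : l.filter (fun x => decide (x ∉ pre ++ [p]))
      = (l.filter (fun x => decide (x ∉ pre))).filter (fun x => decide (x ≠ p)) := by
    rw [List.filter_filter]
    apply List.filter_congr
    intro x _
    by_cases h1 : x ∈ pre <;> by_cases h2 : x = p <;> simp [h1, h2]
  rw [he]
  exact List.length_filter_lt_length_iff_exists.mpr
    ⟨p, List.mem_filter.mpr ⟨hp, by simp [hnp]⟩, by simp⟩

-- the chain walk with a seen-set equals "materialize then scan for the first duplicate"
theorem pvChain_eq (d : PySem.Dict String String) :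
    ∀ (g : Nat) (cur : String) (seen : PySem.Set String),
      seen.Nodup →
      (d.values.filter (fun x => decide (x ∉ seen))).length < g →
      pvWalkA d (g + 1) cur seen =
        (match pvFirstDup seen (pvGen d g cur) with
         | some v => some v
         | none => some ((pvGen d g cur).getLastD cur)) := by
  intro g
  induction g with
  | zero => intro cur seen _ hlt; omega
  | succ g ih =>
    intro cur seen hnd hlt
    rw [pvWalkA, pvGen]
    cases hget : d.get? cur with
    | none => simp [pvFirstDup]
    | some p =>
      simp only []
      by_cases hpe : p = ""
      · simp [hpe, pvFirstDup]
      · rw [if_neg hpe]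
        by_cases hs : PySem.Set.contains seen p = true
        · have hmem : p ∈ seen := (PySem.Set.contains_iff seen p).mp hs
          simp [hpe, pvFirstDup, hmem]
        · have hnmem : p ∉ seen := fun hm => hs ((PySem.Set.contains_iff seen p).mpr hm)
          rw [if_neg hs]
          have hadd : PySem.Set.add seen p = seen ++ [p] := PySem.Set.add_of_not_mem hnmem
          have hpv : p ∈ d.values := by
            have hit := PySem.Dict.mem_items_of_get?_eq_some d hget
            exact List.mem_map.mpr ⟨(cur, p), hit, rfl⟩
          have hlt' : (d.values.filter (fun x => decide (x ∉ seen ++ [p]))).length < g := by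
            have := pvFilter_measure d.values seen p hpv hnmem
            omega
          have hnd' : (seen ++ [p]).Nodup := by
            simp [List.nodup_append, hnd]
            intro a ha hap
            exact hnmem (hap ▸ ha)
          have := ih p (seen ++ [p]) hnd' hlt'
          have hlast : (p :: pvGen d g p).getLastD cur = (pvGen d g p).getLastD p := by
            cases hl : pvGen d g p <;> simp [List.getLastD]
          rw [hadd, this, if_neg hpe,
              show pvFirstDup seen (p :: pvGen d g p) = pvFirstDup (seen ++ [p]) (pvGen d g p) from
                by rw [pvFirstDup, if_neg hnmem],
              hlast]

-- ===== VERDICT (by name: the statement is the Claim_ definition above) =====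
theorem root_physical_disk_py_spec : Claim_equal_root_physical_disk_py := by
  intro parts _
  show root_physical_disk_py parts = root_physical_disk_py_alt parts
  rw [root_physical_disk_py, root_physical_disk_py_alt, pvRoot_eq, pvDictB_eq]
  cases h : ((parts.find? (fun p => (pvGet p "mountpoint").getD "" == "/")).bind
              (fun p => pvGet p "name")).filter (fun n => !(n == "")) with
  | none => rfl
  | some rn =>
    have hrn : rn ≠ "" := pvFilter_ne _ rn h
    show (if rn = "" then none else pvWalkA (pvDictA parts) (parts.length + 2) rn PySem.Set.empty)
        = (match pvFirstDup [] (pvGen (pvDictA parts) (parts.length + 1) rn) with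
           | some v => some v
           | none => some ((pvGen (pvDictA parts) (parts.length + 1) rn).getLastD rn))
    rw [if_neg hrn]
    have hsz : (pvDictA parts).values.length ≤ parts.length := by
      have := pvDictA_size_le parts
      simpa [PySem.Dict.values, PySem.Dict.size] using this
    exact pvChain_eq (pvDictA parts) (parts.length + 1) rn PySem.Set.empty
      List.nodup_nil
      (by simpa using Nat.lt_succ_of_le hsz)
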